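-- pv_equiv track=rewrite | github.com/moritzwilhelm/Advent-of-Code-2020 | day20/solution.py | get_adjacent_tile_count
-- ===== SOURCE A (Python) =====
-- def get_adjacent_tile_count(tiles, tile):
--     borders = [
--         tiles[tile][0],  # top
--         ''.join([line[-1] for line in tiles[tile]]),  # right
--         tiles[tile][-1][::-1],  # bottom
--         ''.join([line[0] for line in tiles[tile]])[::-1]  # left
--     ]
--     border_match_count = 0
--
--     for other in tiles:
--         if other != tile:
--             other_borders = [
--                 tiles[other][0],  # top
--                 ''.join([line[-1] for line in tiles[other]]),  # right
--                 tiles[other][-1][::-1],  # bottom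
--                 ''.join([line[0] for line in tiles[other]])[::-1]  # left
--             ]
--             for border in borders:
--                 for other_border in other_borders:
--                     if border == other_border or border == other_border[::-1]:
--                         border_match_count += 1
--                         break
--                 else:
--                     continue
--                 break
--     return border_match_count
-- ===== SOURCE B (Python) =====
-- def get_adjacent_tile_count(tiles, tile):
--     def borders_of(grid):
--         return [grid[0],
--                 ''.join(line[-1] for line in grid),
--                 grid[-1][::-1],
--                 ''.join(line[0] for line in grid)[::-1]]
--
--     # inverted index: border string (in both orientations) -> set of tile ids having it
--     index = {}
--     for tid, grid in tiles.items():
--         for b in borders_of(grid):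
--             index.setdefault(b, set()).add(tid)
--             index.setdefault(b[::-1], set()).add(tid)
--
--     neighbours = set()
--     for b in borders_of(tiles[tile]):
--         neighbours.update(index.get(b, set()))
--     neighbours.discard(tile)
--     return len(neighbours)
-- ===== Notes on version B (the rewrite author's own statement) =====
-- stated objective: alternative
-- what changed: Replaces A's single pass with a nested 4x4 border/reversal comparison per other tile by a staged inverted-index algorithm: one pass builds a dict mapping every border string (in both orientations) to the set of tile ids carrying it, then the answer is the size of the union of the buckets of the target's four borders with the tile itself discarded.
import Mathlib
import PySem

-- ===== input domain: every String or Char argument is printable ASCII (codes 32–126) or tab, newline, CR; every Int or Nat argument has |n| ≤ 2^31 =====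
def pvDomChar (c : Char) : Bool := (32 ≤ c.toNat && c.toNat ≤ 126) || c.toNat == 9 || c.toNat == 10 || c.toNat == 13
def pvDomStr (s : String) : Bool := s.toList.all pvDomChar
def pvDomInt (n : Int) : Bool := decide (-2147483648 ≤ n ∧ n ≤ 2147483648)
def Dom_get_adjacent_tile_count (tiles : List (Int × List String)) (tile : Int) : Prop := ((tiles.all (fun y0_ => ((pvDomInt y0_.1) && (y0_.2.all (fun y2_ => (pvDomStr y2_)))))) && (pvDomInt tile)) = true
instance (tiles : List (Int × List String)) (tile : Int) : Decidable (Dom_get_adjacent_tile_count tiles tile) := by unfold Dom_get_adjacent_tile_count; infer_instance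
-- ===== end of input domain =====

-- B replaces A's per-other-tile nested border matching by a staged inverted index
-- (border -> set of tile ids, under both orientations) built once over all tiles; the answer
-- is the size of the union of the target's four buckets minus the tile itself (objective: alternative).


-- ===== PORT A =====
-- the four borders of a grid, as in both Pythons: top row; right column; reversed bottom row;
-- reversed left column.  Exact under Pre_ (grid and every line nonempty); the getLastD/headD
-- defaults are never reached there.
def pvBorders (g : List String) : List (List Char) :=
  [ (g.headD "").toList,
    g.map (fun l => l.toList.getLastD ' '),
    ((g.getLastD "").toList).reverse,
    (g.map (fun l => l.toList.headD ' ')).reverse ]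

-- A's inner 'for border … for other_border … break/else/continue/break': 1 is added iff some
-- pair matches directly or reversed — the any/any fold is that loop with break.
def pvMatchA (bs os : List (List Char)) : Bool :=
  bs.any (fun b => os.any (fun ob => b == ob || b == ob.reverse))

def get_adjacent_tile_count (tiles : List (Int × List String)) (tile : Int) : Int :=
  let d := PySem.Dict.ofList tiles
  let borders := pvBorders ((d.get? tile).getD [])
  d.keys.foldl (fun cnt other =>
    if other != tile then
      if pvMatchA borders (pvBorders ((d.get? other).getD [])) then cnt + 1 else cnt
    else cnt) 0

-- ===== PORT B =====
-- the inner loop body: 'index.setdefault(b, set()).add(tid); index.setdefault(b[::-1], set()).add(tid)'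
-- (setdefault(k, set()).add is Dict.modify with default empty set)
def pvAddBoth (t : Int) (idx : PySem.Dict (List Char) (PySem.Set Int)) (c : List Char) :
    PySem.Dict (List Char) (PySem.Set Int) :=
  (idx.modify c PySem.Set.empty (fun s => PySem.Set.add s t)).modify c.reverse PySem.Set.empty
    (fun s => PySem.Set.add s t)

-- one tile's pass of the index-building loop: 'for b in borders_of(grid): …'
def pvIndexStep (idx : PySem.Dict (List Char) (PySem.Set Int)) (p : Int × List String) :
    PySem.Dict (List Char) (PySem.Set Int) :=
  (pvBorders p.2).foldl (pvAddBoth p.1) idx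

def get_adjacent_tile_count_alt (tiles : List (Int × List String)) (tile : Int) : Int :=
  let d := PySem.Dict.ofList tiles
  let index := d.items.foldl pvIndexStep PySem.Dict.empty
  let neighbours := (pvBorders ((d.get? tile).getD [])).foldl
    (fun ns b => PySem.Set.update ns (index.getD b PySem.Set.empty)) PySem.Set.empty
  PySem.Set.len (PySem.Set.discard neighbours tile)

-- ===== PRECONDITION & SPEC =====
-- Pre_ excludes exactly the inputs where Python A raises: tile not a key of the dict (KeyError),
-- or some tile's grid is empty / has an empty line (IndexError on grid[0] / line[-1] / line[0]).
def Pre_get_adjacent_tile_count (tiles : List (Int × List String)) (tile : Int) : Prop :=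
  (PySem.Dict.ofList tiles).contains tile = true ∧
  ∀ g ∈ (PySem.Dict.ofList tiles).values, g ≠ [] ∧ ∀ l ∈ g, l ≠ ""
instance (tiles : List (Int × List String)) (tile : Int) : Decidable (Pre_get_adjacent_tile_count tiles tile) := by unfold Pre_get_adjacent_tile_count; infer_instance

def pvWitness_get_adjacent_tile_count : (List (Int × List String)) × Int :=
  ([(0, ["ab", "cd"]), (1, ["bd", "xy"])], 0)

def Spec_get_adjacent_tile_count (tiles : List (Int × List String)) (tile : Int) (out : Int) : Prop := out = get_adjacent_tile_count_alt tiles tile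
instance (tiles : List (Int × List String)) (tile : Int) (out : Int) : Decidable (Spec_get_adjacent_tile_count tiles tile out) := by unfold Spec_get_adjacent_tile_count; infer_instance

-- ===== CLAIM (what is proved, stated in full; the proofs are below) =====
def Claim_equal_get_adjacent_tile_count : Prop := ∀ (tiles : List (Int × List String)) (tile : Int), Dom_get_adjacent_tile_count tiles tile → Pre_get_adjacent_tile_count tiles tile → Spec_get_adjacent_tile_count tiles tile (get_adjacent_tile_count tiles tile)

-- ===== LEMMAS AND PROOFS =====

-- one border's double insertion: bucket b gains exactly t, at keys c and c.reverse
theorem pvAddBoth_mem (idx : PySem.Dict (List Char) (PySem.Set Int)) (c b : List Char) (t k : Int) :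
    k ∈ (pvAddBoth t idx c).getD b PySem.Set.empty ↔
      k ∈ idx.getD b PySem.Set.empty ∨ (k = t ∧ (b = c ∨ b = c.reverse)) := by
  simp only [pvAddBoth, PySem.Dict.getD_modify]
  split_ifs <;> simp_all [PySem.Set.mem_add]


-- one tile's pass over its four borders
theorem pvIndexStep_mem (idx : PySem.Dict (List Char) (PySem.Set Int)) (p : Int × List String)
    (b : List Char) (k : Int) :
    k ∈ (pvIndexStep idx p).getD b PySem.Set.empty ↔
      k ∈ idx.getD b PySem.Set.empty ∨
        (k = p.1 ∧ ∃ c ∈ pvBorders p.2, b = c ∨ b = c.reverse) := by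
  unfold pvIndexStep
  generalize pvBorders p.2 = bs
  induction bs generalizing idx with
  | nil => simp
  | cons c bs ih =>
      simp only [List.foldl_cons, ih, pvAddBoth_mem, List.mem_cons]
      constructor
      · rintro ((h | ⟨rfl, h⟩) | ⟨rfl, c', hc', h⟩)
        · exact Or.inl h
        · exact Or.inr ⟨rfl, c, Or.inl rfl, h⟩
        · exact Or.inr ⟨rfl, c', Or.inr hc', h⟩
      · rintro (h | ⟨rfl, c', (rfl | hc'), h⟩)
        · exact Or.inl (Or.inl h)
        · exact Or.inl (Or.inr ⟨rfl, h⟩)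
        · exact Or.inr ⟨rfl, c', hc', h⟩


-- bucket membership in the finished index
theorem pvIndex_mem (L : List (Int × List String)) (b : List Char) (k : Int) :
    k ∈ (L.foldl pvIndexStep PySem.Dict.empty).getD b PySem.Set.empty ↔
      ∃ p ∈ L, k = p.1 ∧ ∃ c ∈ pvBorders p.2, b = c ∨ b = c.reverse := by
  have gen : ∀ (idx : PySem.Dict (List Char) (PySem.Set Int)),
      k ∈ (L.foldl pvIndexStep idx).getD b PySem.Set.empty ↔
        k ∈ idx.getD b PySem.Set.empty ∨
          ∃ p ∈ L, k = p.1 ∧ ∃ c ∈ pvBorders p.2, b = c ∨ b = c.reverse := by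
    induction L with
    | nil => simp
    | cons q L ih =>
        intro idx
        simp only [List.foldl_cons, ih, pvIndexStep_mem, List.mem_cons]
        constructor
        · rintro ((h | h) | ⟨p, hp, h⟩)
          · exact Or.inl h
          · exact Or.inr ⟨q, Or.inl rfl, h⟩
          · exact Or.inr ⟨p, Or.inr hp, h⟩
        · rintro (h | ⟨p, (rfl | hp), h⟩)
          · exact Or.inl (Or.inl h)
          · exact Or.inl (Or.inr h)
          · exact Or.inr ⟨p, hp, h⟩
  rw [gen]
  simp [PySem.Dict.getD_empty, PySem.Set.empty]


-- the neighbours fold: union of the buckets of the target's borders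
theorem pvUnionFold_mem (bs : List (List Char)) (index : PySem.Dict (List Char) (PySem.Set Int))
    (s : PySem.Set Int) (k : Int) :
    k ∈ bs.foldl (fun ns b => PySem.Set.update ns (index.getD b PySem.Set.empty)) s ↔
      k ∈ s ∨ ∃ b ∈ bs, k ∈ index.getD b PySem.Set.empty := by
  induction bs generalizing s with
  | nil => simp
  | cons c bs ih =>
      simp only [List.foldl_cons, ih, PySem.Set.mem_update, List.mem_cons]
      constructor
      · rintro ((h | h) | ⟨b, hb, h⟩)
        · exact Or.inl h
        · exact Or.inr ⟨c, Or.inl rfl, h⟩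
        · exact Or.inr ⟨b, Or.inr hb, h⟩
      · rintro (h | ⟨b, (rfl | hb), h⟩)
        · exact Or.inl (Or.inl h)
        · exact Or.inl (Or.inr h)
        · exact Or.inr ⟨b, hb, h⟩

theorem pvUnionFold_nodup (bs : List (List Char)) (index : PySem.Dict (List Char) (PySem.Set Int))
    (s : PySem.Set Int) (h : s.Nodup) :
    (bs.foldl (fun ns b => PySem.Set.update ns (index.getD b PySem.Set.empty)) s).Nodup := by
  induction bs generalizing s with
  | nil => exact h
  | cons c bs ih => exact ih _ (PySem.Set.nodup_update _ _ h)

-- A's pair scan, as an existential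
theorem pvMatchA_iff (bs os : List (List Char)) :
    pvMatchA bs os = true ↔ ∃ b ∈ bs, ∃ ob ∈ os, b = ob ∨ b = ob.reverse := by
  simp [pvMatchA]

-- ===== VERDICT (by name: the statement is the Claim_ definition above) =====
theorem get_adjacent_tile_count_spec : Claim_equal_get_adjacent_tile_count := by
  intro tiles tile _ _
  unfold Spec_get_adjacent_tile_count get_adjacent_tile_count get_adjacent_tile_count_alt
  dsimp only
  have hnd : (PySem.Dict.ofList tiles).keys.Nodup := PySem.Dict.nodup_keys_ofList tiles
  set d := PySem.Dict.ofList tiles with hd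
  set Btgt := pvBorders ((d.get? tile).getD []) with hB
  set index := d.items.foldl pvIndexStep PySem.Dict.empty with hI
  set ns := Btgt.foldl (fun ns b => PySem.Set.update ns (index.getD b PySem.Set.empty))
    PySem.Set.empty with hns
  set P : Int → Bool := fun o => (o != tile) && pvMatchA Btgt (pvBorders ((d.get? o).getD []))
    with hP
  have hstep : (fun (cnt : Int) other =>
      if other != tile then
        if pvMatchA Btgt (pvBorders ((d.get? other).getD [])) then cnt + 1 else cnt
      else cnt) = (fun cnt other => if P other then cnt + 1 else cnt) := by
    funext cnt o
    cases h1 : (o != tile) <;>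
      cases h2 : pvMatchA Btgt (pvBorders ((d.get? o).getD [])) <;> simp [hP, h1, h2]
  rw [hstep, PySem.List.foldl_count_if, List.countP_eq_length_filter]
  have hmem : ∀ x : Int, x ∈ d.keys.filter P ↔ x ∈ PySem.Set.discard ns tile := by
    intro x
    rw [List.mem_filter, PySem.Set.mem_discard, hns, pvUnionFold_mem]
    simp only [hP, Bool.and_eq_true, bne_iff_ne, ne_eq, pvMatchA_iff, hI, pvIndex_mem]
    simp only [PySem.Set.empty, List.not_mem_nil, false_or]
    constructor
    · rintro ⟨hx, hne, b, hb, ob, hob, hor⟩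
      obtain ⟨g, hg⟩ : ∃ g, d.get? x = some g := by
        rcases h : d.get? x with _ | g
        · exact absurd ((PySem.Dict.get?_eq_none_iff_not_mem_keys d x).mp h) (by simpa using hx)
        · exact ⟨g, rfl⟩
      refine ⟨⟨b, hb, (x, g), PySem.Dict.mem_items_of_get?_eq_some d hg, rfl, ob, ?_, hor⟩, hne⟩
      simpa [hg] using hob
    · rintro ⟨⟨b, hb, p, hp, rfl, c, hc, hor⟩, hne⟩
      have hget : d.get? p.1 = some p.2 := PySem.Dict.get?_of_mem_items d hp hnd
      refine ⟨PySem.Dict.mem_keys_of_mem_items d hp, hne, b, hb, c, ?_, hor⟩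
      simpa [hget] using hc
  have hperm : (d.keys.filter P).Perm (PySem.Set.discard ns tile) :=
    (List.perm_ext_iff_of_nodup (hnd.filter P)
      (PySem.Set.nodup_discard _ _ (pvUnionFold_nodup _ _ _ List.nodup_nil))).mpr hmem
  simp [PySem.Set.len, PySem.Set.discard, hperm.length_eq]
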